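-- pv_equiv track=rewrite | github.com/PiotWodecki/JiBAD | Lab3/Polynomial.py | check_if_number_is_solution
-- ===== SOURCE A (Python) =====
-- def check_if_number_is_solution(factors, number):
--     sum = 0
--     for index, x in enumerate(factors):
--         sum += x*(number**index)
--     if sum == 0:
--         return True
--     else:
--         return False
-- ===== SOURCE B (Python) =====
-- def check_if_number_is_solution(factors, number):
--     # Horner's method: evaluate from the highest coefficient down,
--     # one multiplication and one addition per coefficient.
--     acc = 0
--     for c in reversed(factors):
--         acc = acc * number + c
--     return acc == 0
-- ===== Notes on version B (the rewrite author's own statement) =====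
-- stated objective: faster
-- what changed: Replaced the per-term power computation number**index with Horner's method over the reversed coefficient list (one multiply-add per coefficient).
import Mathlib
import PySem

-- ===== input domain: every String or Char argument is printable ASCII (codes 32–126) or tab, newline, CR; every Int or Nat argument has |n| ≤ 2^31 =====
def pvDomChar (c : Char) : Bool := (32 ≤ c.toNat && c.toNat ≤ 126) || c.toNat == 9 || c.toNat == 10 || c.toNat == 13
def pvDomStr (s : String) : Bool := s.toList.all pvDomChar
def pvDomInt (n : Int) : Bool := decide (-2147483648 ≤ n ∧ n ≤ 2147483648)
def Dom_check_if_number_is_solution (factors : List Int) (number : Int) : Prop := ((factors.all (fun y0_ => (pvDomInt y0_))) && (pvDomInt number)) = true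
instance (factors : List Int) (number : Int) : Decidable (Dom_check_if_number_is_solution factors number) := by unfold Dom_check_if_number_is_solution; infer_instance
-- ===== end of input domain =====

-- ===== PORT A =====
-- A: sum of x * number**index over enumerate(factors); return sum == 0.
def check_if_number_is_solution (factors : List Int) (number : Int) : Bool :=
  let sum := (PySem.List.enumerate factors 0).foldl (fun s p => s + p.2 * number ^ p.1.toNat) 0
  if sum = 0 then true else false

-- ===== PORT B =====
-- B: Horner's method over the reversed coefficient list (one multiply-add per coefficient).
def check_if_number_is_solution_alt (factors : List Int) (number : Int) : Bool :=
  decide (factors.reverse.foldl (fun acc c => acc * number + c) 0 = 0)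

-- ===== PRECONDITION & SPEC =====
def Spec_check_if_number_is_solution (factors : List Int) (number : Int) (out : Bool) : Prop := out = check_if_number_is_solution_alt factors number
instance (factors : List Int) (number : Int) (out : Bool) : Decidable (Spec_check_if_number_is_solution factors number out) := by unfold Spec_check_if_number_is_solution; infer_instance

-- ===== CLAIM (what is proved, stated in full; the proofs are below) =====
def Claim_equal_check_if_number_is_solution : Prop := ∀ (factors : List Int) (number : Int), Dom_check_if_number_is_solution factors number → Spec_check_if_number_is_solution factors number (check_if_number_is_solution factors number)

-- ===== LEMMAS AND PROOFS =====

-- A's enumerated power-sum, started at index k with accumulator a, equals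
-- a + number^k * (Horner value of the remaining coefficients).
theorem pvA_foldl_eq (factors : List Int) (number : Int) :
    ∀ (k : Nat) (a : Int),
      (PySem.List.enumerate factors (k : Int)).foldl (fun s p => s + p.2 * number ^ p.1.toNat) a
        = a + number ^ k * factors.foldr (fun c acc => c + number * acc) 0 := by
  induction factors with
  | nil => intro k a; simp [PySem.List.enumerate_nil]
  | cons x xs ih =>
    intro k a
    rw [PySem.List.enumerate_cons, List.foldl_cons]
    have hk : ((k : Int) + 1) = ((k + 1 : Nat) : Int) := by push_cast; ring
    rw [hk, ih (k + 1)]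
    simp [pow_succ]
    ring

-- B's left fold over the reversed list is the foldr Horner evaluation.
theorem pvB_foldl_reverse (factors : List Int) (number : Int) :
    factors.reverse.foldl (fun acc c => acc * number + c) 0
      = factors.foldr (fun c acc => c + number * acc) 0 := by
  rw [List.foldl_reverse]
  induction factors with
  | nil => rfl
  | cons x xs ih => simp [List.foldr_cons, ih]; ring

-- ===== VERDICT (by name: the statement is the Claim_ definition above) =====
theorem check_if_number_is_solution_spec : Claim_equal_check_if_number_is_solution := by
  intro factors number _
  unfold Spec_check_if_number_is_solution check_if_number_is_solution check_if_number_is_solution_alt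
  have hA := pvA_foldl_eq factors number 0 0
  simp only [Int.natCast_zero] at hA
  rw [hA, pvB_foldl_reverse]
  simp
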